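-- pv_equiv track=rewrite | github.com/nagarajankarthikeyan/CE | ce-genai-analytics/backend/app/value_semantic_resolver.py | _pick_hierarchy_columns
-- ===== SOURCE A (Python) =====
-- def _pick_hierarchy_columns(string_columns: set[str]) -> dict[str, str | None]:
--     def pick_first(candidates):
--         for c in sorted(string_columns):
--             if candidates(c):
--                 return c
--         return None
--
--     business_col = pick_first(lambda c: "business" in c and "line" in c)
--     campaign_col = pick_first(lambda c: "campaign" in c)
--     ad_col = pick_first(lambda c: "ad" in c or "creative" in c)
--
--     return {
--         "business": business_col,
--         "campaign": campaign_col,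
--         "ad": ad_col,
--     }
-- ===== SOURCE B (Python) =====
-- def _pick_hierarchy_columns(string_columns: set[str]) -> dict[str, str | None]:
--     business = campaign = ad = None
--     for c in sorted(string_columns):
--         if business is None and "business" in c and "line" in c:
--             business = c
--         if campaign is None and "campaign" in c:
--             campaign = c
--         if ad is None and ("ad" in c or "creative" in c):
--             ad = c
--     return {"business": business, "campaign": campaign, "ad": ad}
-- ===== Notes on version B (the rewrite author's own statement) =====
-- stated objective: simpler
-- what changed: A sorts and scans the column list once per category (three full passes with a closure); B sorts once and fills the three slots independently in a single pass with None guards.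
import Mathlib
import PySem

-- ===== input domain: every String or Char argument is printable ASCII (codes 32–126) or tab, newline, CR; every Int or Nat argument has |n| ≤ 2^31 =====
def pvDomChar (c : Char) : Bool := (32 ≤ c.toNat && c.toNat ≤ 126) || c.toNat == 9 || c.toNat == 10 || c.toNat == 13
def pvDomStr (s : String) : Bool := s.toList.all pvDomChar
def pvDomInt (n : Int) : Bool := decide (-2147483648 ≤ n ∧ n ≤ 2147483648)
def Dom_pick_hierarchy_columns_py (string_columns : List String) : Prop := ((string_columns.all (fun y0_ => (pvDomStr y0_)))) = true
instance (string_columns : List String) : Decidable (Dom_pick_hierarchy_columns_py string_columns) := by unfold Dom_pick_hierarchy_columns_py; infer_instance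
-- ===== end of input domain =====

-- B sorts once and fills the three category slots in a single pass; A re-sorts and re-scans per category.

-- ===== PORT A =====
-- pick_first: loop over sorted(string_columns), return the first c with candidates(c), else None
def pvPickFirstLoop (candidates : String → Bool) : List String → Option String
  | [] => none
  | c :: rest => if candidates c then some c else pvPickFirstLoop candidates rest

def pvPickFirst (string_columns : List String) (candidates : String → Bool) : Option String :=
  pvPickFirstLoop candidates (PySem.List.sorted string_columns (fun x => x) false)

def pick_hierarchy_columns_py (string_columns : List String) : List (String × Option String) :=
  let business_col := pvPickFirst string_columns
    (fun c => PySem.Str.isIn "business" c && PySem.Str.isIn "line" c)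
  let campaign_col := pvPickFirst string_columns (fun c => PySem.Str.isIn "campaign" c)
  let ad_col := pvPickFirst string_columns
    (fun c => PySem.Str.isIn "ad" c || PySem.Str.isIn "creative" c)
  [("business", business_col), ("campaign", campaign_col), ("ad", ad_col)]

-- ===== PORT B =====
def pvBizP (c : String) : Bool := PySem.Str.isIn "business" c && PySem.Str.isIn "line" c
def pvCamP (c : String) : Bool := PySem.Str.isIn "campaign" c
def pvAdP (c : String) : Bool := PySem.Str.isIn "ad" c || PySem.Str.isIn "creative" c

-- the single for-loop of Source B over the sorted list, carrying the three slots
def pvScan : List String → Option String → Option String → Option String →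
    Option String × Option String × Option String
  | [], b, k, a => (b, k, a)
  | c :: rest, b, k, a =>
      pvScan rest
        (if b.isNone && pvBizP c then some c else b)
        (if k.isNone && pvCamP c then some c else k)
        (if a.isNone && pvAdP c then some c else a)

def pick_hierarchy_columns_py_alt (string_columns : List String) : List (String × Option String) :=
  let r := pvScan (PySem.List.sorted string_columns (fun x => x) false) none none none
  [("business", r.1), ("campaign", r.2.1), ("ad", r.2.2)]

-- ===== PRECONDITION & SPEC =====
def Spec_pick_hierarchy_columns_py (string_columns : List String) (out : List (String × Option String)) : Prop := out = pick_hierarchy_columns_py_alt string_columns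
instance (string_columns : List String) (out : List (String × Option String)) : Decidable (Spec_pick_hierarchy_columns_py string_columns out) := by unfold Spec_pick_hierarchy_columns_py; infer_instance

-- ===== CLAIM (what is proved, stated in full; the proofs are below) =====
def Claim_equal_pick_hierarchy_columns_py : Prop := ∀ (string_columns : List String), Dom_pick_hierarchy_columns_py string_columns → Spec_pick_hierarchy_columns_py string_columns (pick_hierarchy_columns_py string_columns)

-- ===== LEMMAS AND PROOFS =====
-- the one-pass scan computes, per slot, "current value orElse first match in the rest"
theorem pvStep_orElse (p : String → Bool) (c : String) (rest : List String) (o : Option String) :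
    (if o.isNone && p c then some c else o).orElse (fun _ => pvPickFirstLoop p rest) =
      o.orElse (fun _ => pvPickFirstLoop p (c :: rest)) := by
  cases o <;> simp only [Option.isNone, Bool.true_and, Bool.false_and, pvPickFirstLoop,
    Bool.false_eq_true, if_false] <;> [skip; rfl]
  split_ifs <;> rfl

-- the one-pass scan computes, per slot, "current value orElse first match in the rest"
theorem pvScan_eq (l : List String) (b k a : Option String) :
    pvScan l b k a =
      (b.orElse (fun _ => pvPickFirstLoop pvBizP l),
       k.orElse (fun _ => pvPickFirstLoop pvCamP l),
       a.orElse (fun _ => pvPickFirstLoop pvAdP l)) := by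
  induction l generalizing b k a with
  | nil => cases b <;> cases k <;> cases a <;> rfl
  | cons c rest ih =>
      rw [pvScan, ih, pvStep_orElse, pvStep_orElse, pvStep_orElse]

theorem pick_hierarchy_columns_py_spec : Claim_equal_pick_hierarchy_columns_py := by
  intro string_columns _
  show _ = _
  simp only [pick_hierarchy_columns_py, pick_hierarchy_columns_py_alt, pvPickFirst,
    pvScan_eq]
  rfl
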